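-- pv_equiv track=rewrite | github.com/Masterace12/-Machine-Learning-Shader-Prediction-Compiler | security/spv_static_analyzer.py | _analyze_reachability
-- ===== SOURCE A (Python) =====
-- from typing import Dict, List, Tuple, Optional, Set, Any, Union
-- from enum import Enum, IntEnum
--
-- class SPIRVOpcode(IntEnum):
--     """SPIR-V Opcodes relevant for security analysis"""
--     # Memory operations - potential attack vectors
--     OpLoad = 61
--     OpStore = 62
--     OpImageRead = 98
--     OpImageWrite = 99
--     OpAtomicLoad = 227
--     OpAtomicStore = 228
--     OpAtomicExchange = 229
--     OpAtomicCompareExchange = 230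
--     OpAtomicIIncrement = 231
--     OpAtomicIDecrement = 232
--     OpAtomicIAdd = 233
--     OpAtomicISub = 234
--     OpAtomicSMin = 235
--     OpAtomicUMin = 236
--     OpAtomicSMax = 237
--     OpAtomicUMax = 238
--     OpAtomicAnd = 239
--     OpAtomicOr = 240
--     OpAtomicXor = 241
--
--     # Control flow - obfuscation detection
--     OpBranch = 249
--     OpBranchConditional = 250
--     OpSwitch = 251
--     OpKill = 252
--     OpReturn = 253
--     OpReturnValue = 254
--
--     # Function calls - potential injection points
--     OpFunctionCall = 57
--     OpFunctionParameter = 55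
--     OpFunction = 54
--     OpFunctionEnd = 56
--
--     # Extensions - potential attack vectors
--     OpExtInstImport = 11
--     OpExtInst = 12
--
--     # Debug info that could leak information
--     OpName = 5
--     OpMemberName = 6
--     OpString = 7
--     OpLine = 8
--     OpNoLine = 317
--
--     # Decorations
--     OpDecorate = 71
--     OpMemberDecorate = 72
--     OpDecorationGroup = 73
--
-- def _analyze_reachability(instructions: List[Dict]) -> Set[int]:
--     """Analyze instruction reachability for dead code detection"""
--     reachable = {0}  # Start from first instruction
--
--     # Simple reachability analysis
--     for i, instruction in enumerate(instructions):
--         if i not in reachable: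
--             continue
--
--         opcode = instruction['opcode']
--
--         # Sequential execution
--         if opcode not in [SPIRVOpcode.OpBranch, SPIRVOpcode.OpReturn,
--                          SPIRVOpcode.OpReturnValue, SPIRVOpcode.OpKill]:
--             if i + 1 < len(instructions):
--                 reachable.add(i + 1)
--
--         # Branch targets (simplified - would need proper parsing)
--         if opcode in [SPIRVOpcode.OpBranch, SPIRVOpcode.OpBranchConditional]:
--             # Would need to parse branch targets from operands
--             pass
--
--     return reachable
-- ===== SOURCE B (Python) =====
-- # Simpler decomposition: find the first terminator once, then materialise the
-- # contiguous reachable prefix directly as set(range(limit)) | {0}.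
-- def _analyze_reachability(instructions):
--     limit = len(instructions)
--     for i, instruction in enumerate(instructions):
--         if instruction['opcode'] in (249, 253, 254, 252):
--             limit = i + 1
--             break
--     return set(range(limit)) | {0}
-- ===== Notes on version B (the rewrite author's own statement) =====
-- stated objective: simpler
-- what changed: Instead of propagating reachability step by step through a growing set with a membership guard, B scans once for the index of the first terminator opcode and materialises the contiguous reachable prefix directly as set(range(limit)) | {0}.
import Mathlib
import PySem

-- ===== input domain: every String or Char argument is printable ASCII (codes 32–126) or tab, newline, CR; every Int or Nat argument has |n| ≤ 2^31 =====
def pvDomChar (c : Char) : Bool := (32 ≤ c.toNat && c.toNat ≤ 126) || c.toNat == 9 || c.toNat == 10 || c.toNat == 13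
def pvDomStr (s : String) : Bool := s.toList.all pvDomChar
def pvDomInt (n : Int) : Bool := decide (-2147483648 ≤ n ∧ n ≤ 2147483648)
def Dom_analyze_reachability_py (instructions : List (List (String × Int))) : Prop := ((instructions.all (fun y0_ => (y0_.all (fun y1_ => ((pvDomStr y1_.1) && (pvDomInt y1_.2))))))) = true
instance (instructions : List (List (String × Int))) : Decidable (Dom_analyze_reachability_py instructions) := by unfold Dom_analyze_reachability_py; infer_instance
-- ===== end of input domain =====

-- B replaces A's step-by-step reachability propagation (membership-guarded set growth)
-- by a single scan for the first terminator followed by set(range(limit)) | {0}: simpler.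


-- ===== PORT A =====
-- terminator opcodes: OpBranch, OpReturn, OpReturnValue, OpKill (A's list order)
def pvTerms : List Int := [249, 253, 254, 252]
-- instruction['opcode']: first match in the association list; a missing key is a
-- Python KeyError, excluded by Pre_ below (the default 0 is never read inside Pre_)
def pvOpc (d : List (String × Int)) : Int :=
  (((d.find? (fun q => q.1 == "opcode")).map (fun q => q.2)).getD 0)

def analyze_reachability_py (instructions : List (List (String × Int))) : List Int :=
  -- reachable = {0}; for i, instruction in enumerate(instructions): …
  (PySem.List.enumerate instructions 0).foldl
    (fun reachable p =>
      if !(PySem.Set.contains reachable p.1) then reachable   -- if i not in reachable: continue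
      else
        if !(pvTerms.contains (pvOpc p.2)) then               -- sequential execution
          (if p.1 + 1 < (instructions.length : Int) then PySem.Set.add reachable (p.1 + 1)
           else reachable)
        else reachable)                                        -- (branch-target block is a pass)
    (PySem.Set.ofList [0])

-- ===== PORT B =====
-- the enumerate-with-break loop of Source B: limit = i+1 at the first terminator, else len
def pvFirstLimit (n : Int) : List (List (String × Int)) → Int → Int
  | [], _ => n
  | d :: rest, i => if pvTerms.contains (pvOpc d) then i + 1 else pvFirstLimit n rest (i + 1)

def analyze_reachability_py_alt (instructions : List (List (String × Int))) : List Int :=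
  let limit := pvFirstLimit (instructions.length : Int) instructions 0
  PySem.Set.union (PySem.Set.ofList (PySem.List.pyRange 0 limit 1)) [0]   -- set(range(limit)) | {0}

-- ===== PRECONDITION & SPEC =====
-- Pre_ excludes exactly the inputs on which A raises KeyError: those whose longest
-- prefix of instructions carrying an 'opcode' key is proper and contains no terminator
-- (then the first key-less instruction is reached by the scan).
def Pre_analyze_reachability_py (instructions : List (List (String × Int))) : Prop :=
  (instructions.takeWhile (fun d => d.any (fun q => q.1 == "opcode"))) = instructions
  ∨ (instructions.takeWhile (fun d => d.any (fun q => q.1 == "opcode"))).any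
      (fun d => pvTerms.contains (pvOpc d))
instance (instructions : List (List (String × Int))) : Decidable (Pre_analyze_reachability_py instructions) := by unfold Pre_analyze_reachability_py; infer_instance

def pvWitness_analyze_reachability_py : (List (List (String × Int))) :=
  [[("opcode", 61)], [("opcode", 253)], [("opcode", 61)]]

def Spec_analyze_reachability_py (instructions : List (List (String × Int))) (out : List Int) : Prop := out = analyze_reachability_py_alt instructions
instance (instructions : List (List (String × Int))) (out : List Int) : Decidable (Spec_analyze_reachability_py instructions out) := by unfold Spec_analyze_reachability_py; infer_instance

-- ===== CLAIM (what is proved, stated in full; the proofs are below) =====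
def Claim_equal_analyze_reachability_py : Prop := ∀ (instructions : List (List (String × Int))), Dom_analyze_reachability_py instructions → Pre_analyze_reachability_py instructions → Spec_analyze_reachability_py instructions (analyze_reachability_py instructions)

-- ===== LEMMAS AND PROOFS =====
def pvRng (m : Nat) : List Int := List.map (fun (k : Nat) => (k : Int)) (List.range m)

theorem mem_pvRng (i : Int) (m : Nat) : i ∈ pvRng m ↔ 0 ≤ i ∧ i < m := by
  simp only [pvRng, List.mem_map, List.mem_range]
  constructor
  · rintro ⟨a, ha, rfl⟩; omega
  · intro ⟨h0, h1⟩; exact ⟨i.toNat, by omega, by omega⟩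

theorem pvRng_succ (m : Nat) : pvRng (m + 1) = pvRng m ++ [(m : Int)] := by
  simp [pvRng, List.range_succ]

theorem nodup_pvRng (m : Nat) : (pvRng m).Nodup := by
  unfold pvRng
  exact List.Nodup.map (fun a b h => by exact_mod_cast h) List.nodup_range

theorem contains_pvRng_self (k m : Nat) (h : k < m) :
    PySem.Set.contains (pvRng m) (k : Int) = true := by
  simp only [PySem.Set.contains_eq_listContains, List.contains_eq_mem, decide_eq_true_eq,
    mem_pvRng]
  omega

theorem pv_unreached (step : List Int → (Int × List (String × Int)) → List Int)
    (hstep : ∀ r p, PySem.Set.contains r p.1 = false → step r p = r)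
    (l : List (List (String × Int))) (k : Int) (m : Nat) (hm : (m : Int) ≤ k) :
    (PySem.List.enumerate l k).foldl step (pvRng m) = pvRng m := by
  induction l generalizing k with
  | nil => simp [PySem.List.enumerate_nil]
  | cons d rest ih =>
    rw [PySem.List.enumerate_cons, List.foldl_cons, hstep, ih _ (by omega)]
    simp only [PySem.Set.contains_eq_listContains, List.contains_eq_mem,
      decide_eq_false_iff_not, mem_pvRng]
    omega

theorem pvFirstLimit_cons_pos (n : Int) (d : List (String × Int))
    (rest : List (List (String × Int))) (i : Int) (h : pvOpc d ∈ pvTerms) :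
    pvFirstLimit n (d :: rest) i = i + 1 := by
  simp [pvFirstLimit, h]

theorem pvFirstLimit_cons_neg (n : Int) (d : List (String × Int))
    (rest : List (List (String × Int))) (i : Int) (h : pvOpc d ∉ pvTerms) :
    pvFirstLimit n (d :: rest) i = pvFirstLimit n rest (i + 1) := by
  simp [pvFirstLimit, h]

theorem pv_loopA (n : Int) :
    ∀ (l : List (List (String × Int))) (d : List (String × Int)) (k : Nat),
    n = (k : Int) + 1 + l.length →
    (PySem.List.enumerate (d :: l) (k : Int)).foldl
      (fun reachable p =>
        if !(PySem.Set.contains reachable p.1) then reachable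
        else
          if !(pvTerms.contains (pvOpc p.2)) then
            (if p.1 + 1 < n then PySem.Set.add reachable (p.1 + 1) else reachable)
          else reachable)
      (pvRng (k + 1))
    = pvRng (pvFirstLimit n (d :: l) (k : Int)).toNat := by
  intro l
  induction l with
  | nil =>
    intro d k hn
    simp only [List.length_nil, Nat.cast_zero, add_zero] at hn
    rw [PySem.List.enumerate_cons, PySem.List.enumerate_nil, List.foldl_cons, List.foldl_nil]
    rw [contains_pvRng_self k (k + 1) (by omega)]
    simp only [Bool.not_true, Bool.false_eq_true, if_false]
    by_cases htm : pvOpc d ∈ pvTerms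
    · have htb : pvTerms.contains (pvOpc d) = true := by simpa using htm
      rw [htb]
      simp only [Bool.not_true, Bool.false_eq_true, if_false]
      rw [pvFirstLimit_cons_pos n d [] (k : Int) htm]
      congr 1
    · have htb : pvTerms.contains (pvOpc d) = false := by simpa using htm
      rw [htb]
      have hnlt : ¬ ((k : Int) + 1 < n) := by omega
      simp only [Bool.not_false, if_true, hnlt, if_false]
      rw [pvFirstLimit_cons_neg n d [] (k : Int) htm]
      simp only [pvFirstLimit]
      congr 1
      omega
  | cons e rest ih =>
    intro d k hn
    simp only [List.length_cons] at hn
    rw [PySem.List.enumerate_cons, List.foldl_cons]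
    rw [contains_pvRng_self k (k + 1) (by omega)]
    simp only [Bool.not_true, Bool.false_eq_true, if_false]
    by_cases htm : pvOpc d ∈ pvTerms
    · -- terminator: nothing after index k ever enters the set
      have htb : pvTerms.contains (pvOpc d) = true := by simpa using htm
      rw [htb]
      simp only [Bool.not_true, Bool.false_eq_true, if_false]
      rw [pv_unreached _ ?hs _ _ _ (by omega)]
      case hs =>
        intro r p h
        rw [if_pos]
        rw [h]
        rfl
      rw [pvFirstLimit_cons_pos n d (e :: rest) (k : Int) htm]
      congr 1
    · have htb : pvTerms.contains (pvOpc d) = false := by simpa using htm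
      have hlt : (k : Int) + 1 < n := by push_cast at hn; omega
      rw [htb]
      simp only [Bool.not_false, hlt, if_pos]
      have hadd : PySem.Set.add (pvRng (k + 1)) ((k : Int) + 1) = pvRng (k + 1 + 1) := by
        rw [PySem.Set.add_of_not_mem (by rw [mem_pvRng]; omega), pvRng_succ (k + 1)]
        push_cast
        rfl
      rw [hadd]
      have hrec := ih e (k + 1) (by push_cast at hn ⊢; omega)
      push_cast at hrec
      rw [hrec, pvFirstLimit_cons_neg n d (e :: rest) (k : Int) htm]

theorem pv_limit_bounds (n : Int) :
    ∀ (l : List (List (String × Int))) (k : Int), n = k + l.length →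
    k ≤ pvFirstLimit n l k ∧ pvFirstLimit n l k ≤ n := by
  intro l
  induction l with
  | nil => intro k hn; simp only [pvFirstLimit]; omega
  | cons d rest ih =>
    intro k hn
    simp only [List.length_cons] at hn
    by_cases htm : pvOpc d ∈ pvTerms
    · rw [pvFirstLimit_cons_pos n d rest k htm]
      push_cast at hn; omega
    · have := ih (k + 1) (by push_cast at hn ⊢; omega)
      rw [pvFirstLimit_cons_neg n d rest k htm]
      omega

theorem pyRange_eq_pvRng (m : Nat) : PySem.List.pyRange 0 (m : Int) 1 = pvRng m := by
  rw [PySem.List.pyRange_one]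
  have h1 : ((m : Int) - 0).toNat = m := by omega
  rw [h1]
  unfold pvRng
  apply List.map_congr_left
  intro a _
  omega

-- ===== VERDICT (by name: the statement is the Claim_ definition above) =====
theorem analyze_reachability_py_spec : Claim_equal_analyze_reachability_py := by
  intro instructions _ _
  unfold Spec_analyze_reachability_py analyze_reachability_py analyze_reachability_py_alt
  cases instructions with
  | nil => decide
  | cons d l =>
    have h0 : PySem.Set.ofList [(0 : Int)] = pvRng 1 := by decide
    rw [h0]
    have hA := pv_loopA ((d :: l).length : Int) l d 0
      (by push_cast [List.length_cons]; omega)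
    push_cast at hA
    rw [hA]
    set L : Int := pvFirstLimit ((d :: l).length : Int) (d :: l) 0 with hL
    have hb : 1 ≤ L ∧ L ≤ ((d :: l).length : Int) := by
      constructor
      · rw [hL]
        by_cases htm : pvOpc d ∈ pvTerms
        · rw [pvFirstLimit_cons_pos _ d l 0 htm]; omega
        · rw [pvFirstLimit_cons_neg _ d l 0 htm]
          have := pv_limit_bounds ((d :: l).length : Int) l (0 + 1)
            (by push_cast [List.length_cons]; omega)
          omega
      · exact (pv_limit_bounds ((d :: l).length : Int) (d :: l) 0
          (by push_cast [List.length_cons]; omega)).2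
    obtain ⟨Ln, hLn⟩ : ∃ m : Nat, L = (m : Int) := ⟨L.toNat, by omega⟩
    have hLt : L.toNat = Ln := by omega
    show pvRng L.toNat =
      PySem.Set.union (PySem.Set.ofList (PySem.List.pyRange 0 L 1)) [0]
    rw [hLt]
    conv_rhs => rw [hLn]
    rw [pyRange_eq_pvRng, PySem.Set.ofList_eq_self_of_nodup _ (nodup_pvRng _)]
    have h0mem : (0 : Int) ∈ pvRng Ln := by rw [mem_pvRng]; omega
    show pvRng Ln = PySem.Set.update (pvRng Ln) [0]
    rw [PySem.Set.update_cons, PySem.Set.add_of_mem h0mem, PySem.Set.update_nil]
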